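-- pv_equiv track=rewrite | github.com/ahmedaskander2000/The-dev-squad-2000 | core_functions.py | detect_leet_substitutions
-- ===== SOURCE A (Python) =====
-- def detect_leet_substitutions(password):
--     """الكشف عن استبدالات الليت"""
--     leet_map = {
--         '4': 'a', '@': 'a', '8': 'b', '3': 'e',
--         '6': 'g', '9': 'g', '1': 'i', '!': 'i',
--         '0': 'o', '$': 's', '5': 's', '7': 't',
--         '2': 'z'
--     }
--
--     original_word = password.lower()
--     for leet_char, normal_char in leet_map.items():
--         original_word = original_word.replace(leet_char, normal_char)
--
--     return original_word
-- ===== SOURCE B (Python) =====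
-- def detect_leet_substitutions(password):
--     """الكشف عن استبدالات الليت"""
--     leet_map = {
--         '4': 'a', '@': 'a', '8': 'b', '3': 'e',
--         '6': 'g', '9': 'g', '1': 'i', '!': 'i',
--         '0': 'o', '$': 's', '5': 's', '7': 't',
--         '2': 'z'
--     }
--     out = []
--     for c in password.lower():
--         out.append(leet_map.get(c, c))
--     return ''.join(out)
-- ===== Notes on version B (the rewrite author's own statement) =====
-- stated objective: simpler
-- what changed: B makes one character-by-character pass over password.lower(), mapping each char through the dict, instead of A's 13 full-string replace passes (safe because no map value is itself a key).
import Mathlib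
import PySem

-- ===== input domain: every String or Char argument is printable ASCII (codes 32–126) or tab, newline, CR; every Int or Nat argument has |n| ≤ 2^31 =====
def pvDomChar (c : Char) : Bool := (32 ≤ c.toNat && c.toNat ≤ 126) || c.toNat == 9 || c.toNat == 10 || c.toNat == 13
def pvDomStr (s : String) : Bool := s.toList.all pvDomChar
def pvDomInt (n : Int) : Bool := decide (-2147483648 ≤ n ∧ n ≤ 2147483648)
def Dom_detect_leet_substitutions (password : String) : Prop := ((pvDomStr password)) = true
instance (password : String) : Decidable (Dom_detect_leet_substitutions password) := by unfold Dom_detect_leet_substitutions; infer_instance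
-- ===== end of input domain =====

-- B replaces A's 13 sequential full-string replace passes by one per-character pass through the map (same values; no map value is itself a key).

-- ===== PORT A =====
-- A's leet_map dict literal (string keys/values, as in Python)
def leetMapA : PySem.Dict String String := PySem.Dict.ofList
  [("4","a"), ("@","a"), ("8","b"), ("3","e"), ("6","g"), ("9","g"), ("1","i"), ("!","i"),
   ("0","o"), ("$","s"), ("5","s"), ("7","t"), ("2","z")]

def detect_leet_substitutions (password : String) : String :=
  let original_word := PySem.Str.lower password
  leetMapA.items.foldl (fun w p => PySem.Str.replace w p.1 p.2) original_word

-- ===== PORT B =====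
-- B's leet_map dict literal (per-character lookup)
def leetMapB : PySem.Dict Char Char := PySem.Dict.ofList
  [('4','a'), ('@','a'), ('8','b'), ('3','e'), ('6','g'), ('9','g'), ('1','i'), ('!','i'),
   ('0','o'), ('$','s'), ('5','s'), ('7','t'), ('2','z')]

def detect_leet_substitutions_alt (password : String) : String :=
  String.ofList ((PySem.Str.lower password).toList.map (fun c => leetMapB.getD c c))

-- ===== PRECONDITION & SPEC =====
def Spec_detect_leet_substitutions (password : String) (out : String) : Prop := out = detect_leet_substitutions_alt password
instance (password : String) (out : String) : Decidable (Spec_detect_leet_substitutions password out) := by unfold Spec_detect_leet_substitutions; infer_instance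

-- ===== CLAIM (what is proved, stated in full; the proofs are below) =====
def Claim_equal_detect_leet_substitutions : Prop := ∀ (password : String), Dom_detect_leet_substitutions password → Spec_detect_leet_substitutions password (detect_leet_substitutions password)

-- ===== LEMMAS AND PROOFS =====

/-- substituting one char for another -/
def sub1 (o n c : Char) : Char := if c == o then n else c

lemma replace_go_single (o n : Char) : ∀ (l acc : List Char),
    PySem.Chars.replace.go [o] [n] l.length l acc = acc.reverse ++ l.map (sub1 o n) := by
  intro l
  induction l with
  | nil => intro acc; simp [PySem.Chars.replace.go]
  | cons c t ih =>
    intro acc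
    simp only [List.length_cons, PySem.Chars.replace.go, List.isPrefixOf, List.map_cons, sub1]
    by_cases h : o == c
    · have hc : c == o := by simp_all
      simp [h, hc, ih]
    · have hc : (c == o) = false := by
        simp only [beq_iff_eq] at *; exact beq_eq_false_iff_ne.mpr (fun e => h e.symm)
      simp [h, hc, ih]

lemma replace_single (o n : Char) (cs : List Char) :
    PySem.Chars.replace cs [o] [n] = cs.map (sub1 o n) := by
  have := replace_go_single o n cs []
  simpa [PySem.Chars.replace] using this

theorem detect_leet_substitutions_spec : Claim_equal_detect_leet_substitutions := by
  intro password _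
  unfold Spec_detect_leet_substitutions detect_leet_substitutions detect_leet_substitutions_alt
  apply String.toList_injective
  have hitems : leetMapA.items =
      [("4","a"), ("@","a"), ("8","b"), ("3","e"), ("6","g"), ("9","g"), ("1","i"), ("!","i"),
       ("0","o"), ("$","s"), ("5","s"), ("7","t"), ("2","z")] := by decide
  rw [hitems]
  simp only [List.foldl_cons, List.foldl_nil]
  -- string-literal toList facts, then each single-char replace pass becomes a map
  have e1 : ("4":String).toList = ['4'] := rfl
  have e2 : ("@":String).toList = ['@'] := rfl
  have e3 : ("8":String).toList = ['8'] := rfl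
  have e4 : ("3":String).toList = ['3'] := rfl
  have e5 : ("6":String).toList = ['6'] := rfl
  have e6 : ("9":String).toList = ['9'] := rfl
  have e7 : ("1":String).toList = ['1'] := rfl
  have e8 : ("!":String).toList = ['!'] := rfl
  have e9 : ("0":String).toList = ['0'] := rfl
  have e10 : ("$":String).toList = ['$'] := rfl
  have e11 : ("5":String).toList = ['5'] := rfl
  have e12 : ("7":String).toList = ['7'] := rfl
  have e13 : ("2":String).toList = ['2'] := rfl
  have f1 : ("a":String).toList = ['a'] := rfl
  have f2 : ("b":String).toList = ['b'] := rfl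
  have f3 : ("e":String).toList = ['e'] := rfl
  have f4 : ("g":String).toList = ['g'] := rfl
  have f5 : ("i":String).toList = ['i'] := rfl
  have f6 : ("o":String).toList = ['o'] := rfl
  have f7 : ("s":String).toList = ['s'] := rfl
  have f8 : ("t":String).toList = ['t'] := rfl
  have f9 : ("z":String).toList = ['z'] := rfl
  have point : ∀ c : Char,
      sub1 '2' 'z' (sub1 '7' 't' (sub1 '5' 's' (sub1 '$' 's' (sub1 '0' 'o' (sub1 '!' 'i'
        (sub1 '1' 'i' (sub1 '9' 'g' (sub1 '6' 'g' (sub1 '3' 'e' (sub1 '8' 'b'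
        (sub1 '@' 'a' (sub1 '4' 'a' c)))))))))))) = leetMapB.getD c c := by
    intro c
    by_cases h : c ∈ (['4','@','8','3','6','9','1','!','0','$','5','7','2'] : List Char)
    · fin_cases h <;> decide
    · simp only [List.mem_cons, List.not_mem_nil, or_false, not_or] at h
      obtain ⟨h4,hA,h8,h3,h6,h9,h1,hB,h0,hD,h5,h7,h2⟩ := h
      have hBitems : leetMapB.items =
          [('4','a'), ('@','a'), ('8','b'), ('3','e'), ('6','g'), ('9','g'), ('1','i'),
           ('!','i'), ('0','o'), ('$','s'), ('5','s'), ('7','t'), ('2','z')] := by decide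
      simp only [PySem.Dict.getD, PySem.Dict.get?, hBitems]
      have b4 : ('4' == c) = false := by simp [Ne.symm h4]
      have bA : ('@' == c) = false := by simp [Ne.symm hA]
      have b8 : ('8' == c) = false := by simp [Ne.symm h8]
      have b3 : ('3' == c) = false := by simp [Ne.symm h3]
      have b6 : ('6' == c) = false := by simp [Ne.symm h6]
      have b9 : ('9' == c) = false := by simp [Ne.symm h9]
      have b1 : ('1' == c) = false := by simp [Ne.symm h1]
      have bB : ('!' == c) = false := by simp [Ne.symm hB]
      have b0 : ('0' == c) = false := by simp [Ne.symm h0]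
      have bD : ('$' == c) = false := by simp [Ne.symm hD]
      have b5 : ('5' == c) = false := by simp [Ne.symm h5]
      have b7 : ('7' == c) = false := by simp [Ne.symm h7]
      have b2 : ('2' == c) = false := by simp [Ne.symm h2]
      simp [sub1, List.find?, b4,bA,b8,b3,b6,b9,b1,bB,b0,bD,b5,b7,b2,
        h4,hA,h8,h3,h6,h9,h1,hB,h0,hD,h5,h7,h2]
  simp only [PySem.Str.toList_replace, e1,e2,e3,e4,e5,e6,e7,e8,e9,e10,e11,e12,e13,
    f1,f2,f3,f4,f5,f6,f7,f8,f9, replace_single, String.toList_ofList, List.map_map]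
  apply List.map_congr_left
  intro c _
  simp only [Function.comp]
  exact point c
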